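-- pv_equiv track=rewrite | github.com/HugoFara/pylinkage | src/pylinkage/topology/isomorphism.py | _class_permutations
-- ===== SOURCE A (Python) =====
-- from itertools import permutations
--
-- def _class_permutations(
--     classes: list[list[int]],
--     n: int,
-- ) -> list[list[int]]:
--     """Generate all permutations that only permute within color classes.
--
--     Each class is independently permuted. The result is the full list of
--     combined permutations mapping old_index -> new_index.
--     """
--     if not classes:
--         return [[]]
--
--     # For efficiency, limit combinatorial explosion
--     # Product of factorials of class sizes
--     import math
--     total = 1
--     for cls in classes:
--         total *= math.factorial(len(cls))
--         if total > 100_000: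
--             # Fall back to just the identity permutation for huge spaces
--             # WL-1 is sufficient for linkage graphs in practice
--             return [list(range(n))]
--
--     # Generate all class permutations via cartesian product
--     results: list[list[int]] = []
--     _generate_perms(classes, 0, [0] * n, results)
--     return results
--
-- def _generate_perms(
--     classes: list[list[int]],
--     class_idx: int,
--     current: list[int],
--     results: list[list[int]],
-- ) -> None:
--     """Recursively generate permutations for each color class."""
--     if class_idx == len(classes):
--         results.append(list(current))
--         return
--
--     positions = classes[class_idx]
--     for perm in permutations(positions):
--         for i, pos in enumerate(positions):
--             current[pos] = perm[i]
--         _generate_perms(classes, class_idx + 1, current, results)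
-- ===== SOURCE B (Python) =====
-- from itertools import permutations, product
-- import math
--
--
-- def _class_permutations(
--     classes: list[list[int]],
--     n: int,
-- ) -> list[list[int]]:
--     """Generate all permutations that only permute within color classes."""
--     if not classes:
--         return [[]]
--
--     # Identity fallback for huge spaces (product of factorials of class sizes).
--     total = 1
--     for cls in classes:
--         total *= math.factorial(len(cls))
--         if total > 100_000:
--             return [list(range(n))]
--
--     per_class = [list(permutations(cls)) for cls in classes]
--     results: list[list[int]] = []
--     for combo in product(*per_class):
--         current = [0] * n
--         for cls, perm in zip(classes, combo):
--             for i, pos in enumerate(cls):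
--                 current[pos] = perm[i]
--         results.append(current)
--     return results
-- ===== Notes on version B (the rewrite author's own statement) =====
-- stated objective: idiomatic
-- what changed: Replaced the helper recursion that mutates one shared buffer across recursive branches by a flat iteration over the cartesian product of per-class permutation lists, building each result fresh from [0]*n with no helper or recursion.
import Mathlib
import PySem

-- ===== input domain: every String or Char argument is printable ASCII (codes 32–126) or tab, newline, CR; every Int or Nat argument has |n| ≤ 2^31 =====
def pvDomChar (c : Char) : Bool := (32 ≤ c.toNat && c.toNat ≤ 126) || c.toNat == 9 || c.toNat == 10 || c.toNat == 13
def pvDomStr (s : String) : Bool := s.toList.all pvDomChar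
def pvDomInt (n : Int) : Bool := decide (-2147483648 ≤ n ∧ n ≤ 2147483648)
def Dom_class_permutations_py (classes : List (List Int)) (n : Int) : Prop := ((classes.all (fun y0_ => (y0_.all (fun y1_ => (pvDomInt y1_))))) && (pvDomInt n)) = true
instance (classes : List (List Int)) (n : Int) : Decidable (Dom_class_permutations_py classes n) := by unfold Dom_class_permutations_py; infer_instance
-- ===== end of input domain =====

-- B replaces A's recursion over a shared mutated buffer by a cartesian product of
-- per-class permutation lists, each result built fresh (idiomatic decomposition; same cost).


-- ===== PORT A =====
-- for cls in classes: total *= factorial(len(cls)); if total > 100000: early return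
def pvTotalA : List (List Int) → Nat → Bool
  | [], _ => false
  | c :: rest, total =>
      let t := total * Nat.factorial c.length
      if t > 100000 then true else pvTotalA rest t

-- for i, pos in enumerate(positions): current[pos] = perm[i]
def pvWrite (cur : List Int) (positions perm : List Int) : List Int :=
  (positions.zip perm).foldl (fun c pv => PySem.List.pySetD c pv.1 pv.2) cur

-- _generate_perms, threading the mutable state (current, results)
def pvGenA : List (List Int) → List Int → List (List Int) → List Int × List (List Int)
  | [], cur, res => (cur, res ++ [cur])
  | positions :: rest, cur, res =>
      (PySem.List.permutations positions positions.length).foldl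
        (fun s perm => pvGenA rest (pvWrite s.1 positions perm) s.2) (cur, res)

def class_permutations_py (classes : List (List Int)) (n : Int) : List (List Int) :=
  if classes = [] then [[]]
  else if pvTotalA classes 1 then [PySem.List.pyRange 0 n 1]
  else (pvGenA classes (List.replicate n.toNat 0) []).2

-- ===== PORT B =====
-- itertools.product(*lists)
def pvProduct {α : Type} : List (List α) → List (List α)
  | [] => [[]]
  | xs :: rest => xs.flatMap (fun x => (pvProduct rest).map (fun c => x :: c))

-- for cls, perm in zip(classes, combo): for i, pos in enumerate(cls): current[pos] = perm[i]
def pvWriteAll (classesCombo : List (List Int × List Int)) (cur : List Int) : List Int :=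
  classesCombo.foldl (fun c p => pvWrite c p.1 p.2) cur

def class_permutations_py_alt (classes : List (List Int)) (n : Int) : List (List Int) :=
  if classes = [] then [[]]
  else if pvTotalA classes 1 then [PySem.List.pyRange 0 n 1]
  else
    (pvProduct (classes.map (fun c => PySem.List.permutations c c.length))).map
      (fun combo => pvWriteAll (classes.zip combo) (List.replicate n.toNat 0))

-- ===== PRECONDITION & SPEC =====
-- Pre_ excludes exactly the inputs where both Pythons raise IndexError: some class position
-- is not a valid index into the length-n buffer, and the permutation-generating path is taken
-- (classes nonempty and the factorial product within the 100000 bound).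
def Pre_class_permutations_py (classes : List (List Int)) (n : Int) : Prop :=
  (classes ≠ [] ∧ (classes.map (fun c => Nat.factorial c.length)).prod ≤ 100000) →
    ∀ c ∈ classes, ∀ p ∈ c, PySem.Raise.InRange n.toNat p
instance (classes : List (List Int)) (n : Int) : Decidable (Pre_class_permutations_py classes n) := by
  unfold Pre_class_permutations_py; infer_instance
def pvWitness_class_permutations_py : List (List Int) × Int := ([[0, 2], [1]], 3)
def Spec_class_permutations_py (classes : List (List Int)) (n : Int) (out : List (List Int)) : Prop := out = class_permutations_py_alt classes n
instance (classes : List (List Int)) (n : Int) (out : List (List Int)) : Decidable (Spec_class_permutations_py classes n out) := by unfold Spec_class_permutations_py; infer_instance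

-- ===== CLAIM (what is proved, stated in full; the proofs are below) =====
def Claim_equal_class_permutations_py : Prop := ∀ (classes : List (List Int)) (n : Int), Dom_class_permutations_py classes n → Pre_class_permutations_py classes n → Spec_class_permutations_py classes n (class_permutations_py classes n)

-- ===== LEMMAS AND PROOFS =====

theorem pv_pyIdx_lt {L : Nat} {i : Int} {k : Nat} (h : PySem.List.pyIdx? L i = some k) : k < L := by
  unfold PySem.List.pyIdx? at h
  split_ifs at h with h1 h2 h3 <;> simp_all <;> omega

-- pointwise effect of one Python write current[i] = v
theorem pv_getElem?_pySetD (a : List Int) (i : Int) (v : Int) (j : Nat) :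
    (PySem.List.pySetD a i v)[j]? =
      if PySem.List.pyIdx? a.length i = some j then some v else a[j]? := by
  unfold PySem.List.pySetD PySem.List.pySet?
  cases h : PySem.List.pyIdx? a.length i with
  | none => simp [h]
  | some k =>
      simp only [Option.map_some, Option.getD_some, List.getElem?_set,
        if_pos (pv_pyIdx_lt h)]
      by_cases hk : k = j
      · simp [hk]
      · simp [hk]

def pvHitStep (L : Nat) (j : Nat) (acc : Option Int) (pv : Int × Int) : Option Int :=
  if PySem.List.pyIdx? L pv.1 = some j then some pv.2 else acc

theorem pv_length_foldl_pySetD (ws : List (Int × Int)) : ∀ a : List Int,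
    (ws.foldl (fun c pv => PySem.List.pySetD c pv.1 pv.2) a).length = a.length := by
  induction ws with
  | nil => intro a; rfl
  | cons w ws ih =>
      intro a
      simp only [List.foldl_cons]
      rw [ih]; exact PySem.List.length_pySetD a w.1 w.2

theorem pv_foldl_char (ws : List (Int × Int)) : ∀ (a : List Int) (j : Nat),
    (ws.foldl (fun c pv => PySem.List.pySetD c pv.1 pv.2) a)[j]? =
      ws.foldl (pvHitStep a.length j) a[j]? := by
  induction ws with
  | nil => intro a j; rfl
  | cons w ws ih =>
      intro a j
      simp only [List.foldl_cons]
      rw [ih]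
      rw [PySem.List.length_pySetD a w.1 w.2, pv_getElem?_pySetD]
      rfl

theorem pv_hit_fold_const (L j : Nat) (ws : List (Int × Int))
    (h : ∃ pv ∈ ws, PySem.List.pyIdx? L pv.1 = some j) (x y : Option Int) :
    ws.foldl (pvHitStep L j) x = ws.foldl (pvHitStep L j) y := by
  induction ws generalizing x y with
  | nil => exact absurd h (by simp)
  | cons w ws ih =>
      simp only [List.foldl_cons]
      by_cases hw : PySem.List.pyIdx? L w.1 = some j
      · simp [pvHitStep, hw]
      · rcases h with ⟨pv, hpv, hhit⟩
        rcases List.mem_cons.mp hpv with rfl | hmem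
        · exact absurd hhit hw
        · exact ih ⟨pv, hmem, hhit⟩ _ _

theorem pv_nohit_fold (L j : Nat) (ws : List (Int × Int))
    (h : ∀ pv ∈ ws, PySem.List.pyIdx? L pv.1 ≠ some j) (x : Option Int) :
    ws.foldl (pvHitStep L j) x = x := by
  induction ws generalizing x with
  | nil => rfl
  | cons w ws ih =>
      simp only [List.foldl_cons, pvHitStep, if_neg (h w (List.mem_cons_self))]
      exact ih (fun pv hp => h pv (List.mem_cons_of_mem _ hp)) x

theorem pv_mem_zip_of_mem_left {α β : Type} {a : α} {l₁ : List α} (l₂ : List β)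
    (h : a ∈ l₁) (hl : l₁.length = l₂.length) : ∃ b, (a, b) ∈ l₁.zip l₂ := by
  rcases List.mem_iff_getElem.mp h with ⟨i, hi, rfl⟩
  exact ⟨l₂[i]'(hl ▸ hi), List.mem_iff_getElem.mpr ⟨i, by simp [hl ▸ hi, hi], by
    rw [List.getElem_zip]⟩⟩

-- one class write: agreement is preserved, and targeted indices become equal
theorem pv_write_agree (c q a b : List Int) (hab : a.length = b.length)
    (hcq : c.length = q.length) (j : Nat)
    (h : (∃ p ∈ c, PySem.List.pyIdx? a.length p = some j) ∨ a[j]? = b[j]?) :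
    (pvWrite a c q)[j]? = (pvWrite b c q)[j]? := by
  unfold pvWrite
  rw [pv_foldl_char, pv_foldl_char, ← hab]
  rcases h with ⟨p, hp, hhit⟩ | heq
  · refine pv_hit_fold_const _ _ _ ?_ _ _
    rcases pv_mem_zip_of_mem_left q hp hcq with ⟨v, hv⟩
    exact ⟨(p, v), hv, hhit⟩
  · rw [heq]

theorem pv_length_write (a c q : List Int) : (pvWrite a c q).length = a.length :=
  pv_length_foldl_pySetD _ a

-- overwrite congruence: writing all classes erases any disagreement confined to their indices
theorem pv_writeAll_congr (cs combo : List (List Int)) : ∀ (a b : List Int),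
    a.length = b.length →
    (∀ pr ∈ cs.zip combo, pr.1.length = pr.2.length) →
    cs.length = combo.length →
    (∀ j : Nat, (∀ c ∈ cs, ∀ p ∈ c, PySem.List.pyIdx? a.length p ≠ some j) → a[j]? = b[j]?) →
    pvWriteAll (cs.zip combo) a = pvWriteAll (cs.zip combo) b := by
  induction cs generalizing combo with
  | nil =>
      intro a b hab _ _ hagree
      refine List.ext_getElem? fun j => hagree j (by simp)
  | cons c cs ih =>
      intro a b hab hlens hlen hagree
      cases combo with
      | nil => simp at hlen
      | cons q combo =>
          simp only [List.zip_cons_cons, pvWriteAll, List.foldl_cons] at *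
          have hcq : c.length = q.length := hlens (c, q) (List.mem_cons_self)
          have h1 : ∀ j : Nat,
              (∀ c' ∈ cs, ∀ p ∈ c', PySem.List.pyIdx? (pvWrite a c q).length p ≠ some j) →
              (pvWrite a c q)[j]? = (pvWrite b c q)[j]? := by
            intro j hj
            rw [pv_length_write] at hj
            by_cases hc : ∃ p ∈ c, PySem.List.pyIdx? a.length p = some j
            · exact pv_write_agree c q a b hab hcq j (Or.inl hc)
            · push_neg at hc
              refine pv_write_agree c q a b hab hcq j (Or.inr ?_)
              refine hagree j ?_
              intro c' hc' p hp
              rcases List.mem_cons.mp hc' with rfl | hmem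
              · exact hc p hp
              · exact hj c' hmem p hp
          exact ih combo (pvWrite a c q) (pvWrite b c q)
            (by rw [pv_length_write, pv_length_write, hab])
            (fun pr hpr => hlens pr (List.mem_cons_of_mem _ hpr))
            (by simpa using hlen)
            h1

-- every combo in the product picks one element per list
theorem pv_mem_product {α : Type} (ls : List (List α)) : ∀ combo ∈ pvProduct ls,
    combo.length = ls.length ∧ ∀ pr ∈ ls.zip combo, pr.2 ∈ pr.1 := by
  induction ls with
  | nil => intro combo h; simp only [pvProduct, List.mem_singleton] at h; subst h; simp
  | cons xs rest ih =>
      intro combo h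
      simp only [pvProduct, List.mem_flatMap, List.mem_map] at h
      rcases h with ⟨x, hx, c, hc, rfl⟩
      rcases ih c hc with ⟨hlen, hmem⟩
      refine ⟨by simp [hlen], ?_⟩
      intro pr hpr
      simp only [List.zip_cons_cons, List.mem_cons] at hpr
      rcases hpr with rfl | hpr
      · exact hx
      · exact hmem pr hpr

theorem pv_perm_length (c q : List Int) (h : q ∈ PySem.List.permutations c c.length) :
    q.length = c.length :=
  (PySem.List.perm_of_mem_permutations h).length_eq

-- main invariant: the threaded recursion equals the product-of-permutations map
theorem pv_genA_spec (cs : List (List Int)) : ∀ (cur : List Int) (res : List (List Int)),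
    (pvGenA cs cur res).2 = res ++
      (pvProduct (cs.map (fun c => PySem.List.permutations c c.length))).map
        (fun combo => pvWriteAll (cs.zip combo) cur)
    ∧ (pvGenA cs cur res).1.length = cur.length
    ∧ ∀ j : Nat, (∀ c ∈ cs, ∀ p ∈ c, PySem.List.pyIdx? cur.length p ≠ some j) →
        ((pvGenA cs cur res).1)[j]? = cur[j]? := by
  induction cs with
  | nil =>
      intro cur res
      refine ⟨?_, rfl, fun j _ => rfl⟩
      simp [pvGenA, pvProduct, pvWriteAll]
  | cons c rest ih =>
      intro cur res
      have aux : ∀ qs : List (List Int), (∀ q ∈ qs, q.length = c.length) →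
          ∀ (cur' : List Int) (res' : List (List Int)),
          cur'.length = cur.length →
          (∀ j : Nat, (∀ cc ∈ c :: rest, ∀ p ∈ cc, PySem.List.pyIdx? cur.length p ≠ some j) →
            cur'[j]? = cur[j]?) →
          (qs.foldl (fun s perm => pvGenA rest (pvWrite s.1 c perm) s.2) (cur', res')).2
            = res' ++ qs.flatMap (fun q =>
                (pvProduct (rest.map (fun cc => PySem.List.permutations cc cc.length))).map
                  (fun combo => pvWriteAll (rest.zip combo) (pvWrite cur c q)))
          ∧ (qs.foldl (fun s perm => pvGenA rest (pvWrite s.1 c perm) s.2) (cur', res')).1.length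
              = cur.length
          ∧ ∀ j : Nat, (∀ cc ∈ c :: rest, ∀ p ∈ cc, PySem.List.pyIdx? cur.length p ≠ some j) →
              ((qs.foldl (fun s perm => pvGenA rest (pvWrite s.1 c perm) s.2) (cur', res')).1)[j]?
                = cur[j]? := by
        intro qs
        induction qs with
        | nil =>
            intro _ cur' res' hlen hagree
            exact ⟨by simp, hlen, hagree⟩
        | cons q qs ihq =>
            intro hq cur' res' hlen hagree
            have hqc : q.length = c.length := hq q (List.mem_cons_self)
            -- the state after processing perm q
            obtain ⟨E1, E2, E3⟩ := ih (pvWrite cur' c q) res'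
            have hwlen : (pvWrite cur' c q).length = cur.length := by
              rw [pv_length_write, hlen]
            -- replace the dirty buffer by the original one under the full rewrite
            have hres : (pvProduct (rest.map (fun cc => PySem.List.permutations cc cc.length))).map
                  (fun combo => pvWriteAll (rest.zip combo) (pvWrite cur' c q))
                = (pvProduct (rest.map (fun cc => PySem.List.permutations cc cc.length))).map
                  (fun combo => pvWriteAll (rest.zip combo) (pvWrite cur c q)) := by
              refine List.map_congr_left ?_
              intro combo hcombo
              obtain ⟨hclen, hcmem⟩ := pv_mem_product _ combo hcombo
              have hzlen : ∀ pr ∈ rest.zip combo, pr.1.length = pr.2.length := by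
                intro pr hpr
                have hmm : (PySem.List.permutations pr.1 pr.1.length, pr.2)
                    ∈ (rest.map (fun cc => PySem.List.permutations cc cc.length)).zip combo := by
                  rw [List.zip_map_left]
                  exact List.mem_map.mpr ⟨pr, hpr, rfl⟩
                exact (pv_perm_length pr.1 pr.2 (hcmem _ hmm)).symm
              refine pv_writeAll_congr rest combo _ _
                (by rw [pv_length_write, pv_length_write, hlen]) hzlen
                (by rw [List.length_map] at hclen; omega) ?_
              intro j hj
              rw [pv_length_write, hlen] at hj
              by_cases hc : ∃ p ∈ c, PySem.List.pyIdx? cur.length p = some j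
              · exact pv_write_agree c q cur' cur hlen hqc.symm j (Or.inl (by rw [hlen]; exact hc))
              · push_neg at hc
                refine pv_write_agree c q cur' cur hlen hqc.symm j (Or.inr ?_)
                refine hagree j ?_
                intro cc hcc p hp
                rcases List.mem_cons.mp hcc with rfl | hmem
                · exact hc p hp
                · exact hj cc hmem p hp
            -- the buffer after the whole subtree still agrees with cur outside all classes
            have hnext : ∀ j : Nat,
                (∀ cc ∈ c :: rest, ∀ p ∈ cc, PySem.List.pyIdx? cur.length p ≠ some j) →
                ((pvGenA rest (pvWrite cur' c q) res').1)[j]? = cur[j]? := by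
              intro j hj
              have havoidr : ∀ cc ∈ rest, ∀ p ∈ cc,
                  PySem.List.pyIdx? (pvWrite cur' c q).length p ≠ some j := by
                rw [hwlen]
                exact fun cc hcc p hp => hj cc (List.mem_cons_of_mem _ hcc) p hp
              rw [E3 j havoidr]
              have hnoc : (pvWrite cur' c q)[j]? = cur'[j]? := by
                unfold pvWrite
                rw [pv_foldl_char]
                refine pv_nohit_fold _ _ _ ?_ _
                intro pv hpv
                have hmem := (List.of_mem_zip hpv).1
                rw [hlen]
                exact hj c (List.mem_cons_self) pv.1 hmem
              rw [hnoc]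
              exact hagree j hj
            obtain ⟨F1, F2, F3⟩ := ihq (fun q' hq' => hq q' (List.mem_cons_of_mem _ hq'))
              (pvGenA rest (pvWrite cur' c q) res').1
              (pvGenA rest (pvWrite cur' c q) res').2 (E2.trans hwlen) hnext
            refine ⟨?_, ?_, ?_⟩
            · simp only [List.foldl_cons]
              rw [F1, E1, hres]
              simp [List.append_assoc]
            · simpa using F2
            · simpa using F3
      have hgoal := aux (PySem.List.permutations c c.length)
        (fun q hq => pv_perm_length c q hq) cur res rfl (fun _ _ => rfl)
      have hgen : pvGenA (c :: rest) cur res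
          = ((PySem.List.permutations c c.length).foldl
              (fun s perm => pvGenA rest (pvWrite s.1 c perm) s.2) (cur, res)) := rfl
      refine ⟨?_, by rw [hgen]; exact hgoal.2.1, by rw [hgen]; exact hgoal.2.2⟩
      rw [hgen, hgoal.1]
      congr 1
      simp only [List.map_cons, pvProduct, List.map_flatMap, List.map_map]
      refine List.flatMap_congr (fun q _ => ?_)
      refine List.map_congr_left (fun combo _ => ?_)
      simp [pvWriteAll, Function.comp]

-- ===== VERDICT (by name: the statement is the Claim_ definition above) =====
theorem class_permutations_py_spec : Claim_equal_class_permutations_py := by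
  intro classes n _ _
  unfold Spec_class_permutations_py class_permutations_py class_permutations_py_alt
  by_cases h0 : classes = []
  · simp [h0]
  · simp only [if_neg h0]
    by_cases hbig : pvTotalA classes 1 = true
    · rw [if_pos hbig, if_pos hbig]
    · rw [if_neg hbig, if_neg hbig]
      simpa using (pv_genA_spec classes (List.replicate n.toNat 0) []).1
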